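-- pv_equiv track=rewrite | github.com/kikepuppi/2023.1-Dessoft | PI 1/gerando direcoes.py | gera_direcoes
-- ===== SOURCE A (Python) =====
-- def gera_direcoes(x, y):
--     direcoes = ['norte', 'sul', 'leste', 'oeste', 'nordeste', 'noroeste', 'sudeste','sudoeste']
--     coordenadas = []
--     resultado = []
--     for i in range (len(x)):
--         coordenadas.append([x[i], y[i]])
--         if i != 0:
--             if coordenadas[i-1][0] != coordenadas[i][0] and coordenadas[i-1][1] != coordenadas[i][1]:
--                 if coordenadas[i][0] == coordenadas[i-1][0] + 1 and coordenadas[i][1] == coordenadas[i-1][1] + 1: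
--                     resultado.append(direcoes[6])
--                 if coordenadas[i][0] == coordenadas[i-1][0] + 1 and coordenadas[i][1] == coordenadas[i-1][1] - 1:
--                     resultado.append(direcoes[4])
--                 if coordenadas[i][0] == coordenadas[i-1][0] - 1 and coordenadas[i][1] == coordenadas[i-1][1] + 1:
--                     resultado.append(direcoes[7])
--                 if coordenadas[i][0] == coordenadas[i-1][0] - 1 and coordenadas[i][1] == coordenadas[i-1][1] - 1:
--                     resultado.append(direcoes[5])
--             elif coordenadas[i-1][0] != coordenadas[i][0] and coordenadas[i-1][1] == coordenadas[i][1]: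
--                 if coordenadas[i][0] == coordenadas[i-1][0] + 1:
--                     resultado.append(direcoes[2])
--                 if coordenadas[i][0] == coordenadas[i-1][0] - 1:
--                     resultado.append(direcoes[3])
--             elif coordenadas[i-1][0] == coordenadas[i][0] and coordenadas[i-1][1] != coordenadas[i][1]:
--                 if coordenadas[i][1] == coordenadas[i-1][1] + 1:
--                     resultado.append(direcoes[1])
--                 if coordenadas[i][1] == coordenadas[i-1][1] - 1:
--                     resultado.append(direcoes[0])
--     return resultado
-- ===== SOURCE B (Python) =====
-- _DIRECOES = [
--     ((1, 1), 'sudeste'),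
--     ((1, -1), 'nordeste'),
--     ((-1, 1), 'sudoeste'),
--     ((-1, -1), 'noroeste'),
--     ((1, 0), 'leste'),
--     ((-1, 0), 'oeste'),
--     ((0, 1), 'sul'),
--     ((0, -1), 'norte'),
-- ]
--
-- def gera_direcoes(x, y):
--     # Direction-major: for each of the eight compass steps, scan the whole
--     # path collecting the positions where that exact step occurs; then emit
--     # the collected names back in path order.
--     hits = {}
--     for (dx, dy), nome in _DIRECOES:
--         for i in range(1, len(x)):
--             if x[i] == x[i - 1] + dx and y[i] == y[i - 1] + dy:
--                 hits[i] = nome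
--     return [hits[i] for i in sorted(hits)]
-- ===== Notes on version B (the rewrite author's own statement) =====
-- stated objective: alternative
-- what changed: Inverts the traversal: instead of one index-major pass classifying each step through a nested if/elif cascade, B makes one pass per compass direction collecting into a dict the positions where that exact step occurs, then rebuilds the answer by emitting the collected names in sorted position order.
import Mathlib
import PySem

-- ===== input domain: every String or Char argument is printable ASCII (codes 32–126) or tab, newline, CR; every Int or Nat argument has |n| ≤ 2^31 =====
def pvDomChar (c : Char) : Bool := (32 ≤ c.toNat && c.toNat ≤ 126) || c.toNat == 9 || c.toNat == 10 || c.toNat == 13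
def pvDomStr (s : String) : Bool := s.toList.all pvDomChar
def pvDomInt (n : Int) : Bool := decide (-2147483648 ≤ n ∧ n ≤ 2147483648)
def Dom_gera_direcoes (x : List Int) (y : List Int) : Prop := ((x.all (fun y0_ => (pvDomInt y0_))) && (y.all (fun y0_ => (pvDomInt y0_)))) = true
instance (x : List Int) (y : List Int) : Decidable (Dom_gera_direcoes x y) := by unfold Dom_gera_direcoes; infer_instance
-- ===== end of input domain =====

-- B inverts the traversal: one pass per compass direction collecting matching step
-- positions into a dict, then the names are emitted in sorted position order
-- (objective: alternative). Equality is about the RETURN value; neither mutates its arguments.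


-- ===== PORT A =====
-- the constant list 'direcoes' of A, hoisted to a top-level helper
def pvDirecoes : List String :=
  ["norte", "sul", "leste", "oeste", "nordeste", "noroeste", "sudeste", "sudoeste"]

-- the body of A's `for i in range(len(x))` loop; st = (coordenadas, resultado);
-- `resultado.append` threads as `… ++ [·]` in source order; x[i]/y[i]/list indexing via pyGetD
-- (Pre_ keeps every index A reads in range, so the defaults are never returned)
def pvStepA (x : List Int) (y : List Int)
    (st : List (Int × Int) × List String) (i : Int) : List (Int × Int) × List String :=
  let coords := st.1 ++ [(PySem.List.pyGetD x i 0, PySem.List.pyGetD y i 0)]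
  if i ≠ 0 then
    let p := PySem.List.pyGetD coords (i - 1) (0, 0)
    let c := PySem.List.pyGetD coords i (0, 0)
    (coords,
      if p.1 ≠ c.1 ∧ p.2 ≠ c.2 then
        (((st.2 ++ (if c.1 = p.1 + 1 ∧ c.2 = p.2 + 1 then [PySem.List.pyGetD pvDirecoes 6 ""] else []))
               ++ (if c.1 = p.1 + 1 ∧ c.2 = p.2 - 1 then [PySem.List.pyGetD pvDirecoes 4 ""] else []))
               ++ (if c.1 = p.1 - 1 ∧ c.2 = p.2 + 1 then [PySem.List.pyGetD pvDirecoes 7 ""] else []))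
               ++ (if c.1 = p.1 - 1 ∧ c.2 = p.2 - 1 then [PySem.List.pyGetD pvDirecoes 5 ""] else [])
      else if p.1 ≠ c.1 ∧ p.2 = c.2 then
        (st.2 ++ (if c.1 = p.1 + 1 then [PySem.List.pyGetD pvDirecoes 2 ""] else []))
              ++ (if c.1 = p.1 - 1 then [PySem.List.pyGetD pvDirecoes 3 ""] else [])
      else if p.1 = c.1 ∧ p.2 ≠ c.2 then
        (st.2 ++ (if c.2 = p.2 + 1 then [PySem.List.pyGetD pvDirecoes 1 ""] else []))
              ++ (if c.2 = p.2 - 1 then [PySem.List.pyGetD pvDirecoes 0 ""] else [])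
      else st.2)
  else (coords, st.2)

def gera_direcoes (x : List Int) (y : List Int) : List String :=
  ((PySem.List.pyRange 0 (x.length : Int) 1).foldl (pvStepA x y) ([], [])).2

-- ===== PORT B =====
-- B's module-level list _DIRECOES
def pvDirsB : List ((Int × Int) × String) :=
  [((1, 1), "sudeste"), ((1, -1), "nordeste"), ((-1, 1), "sudoeste"), ((-1, -1), "noroeste"),
   ((1, 0), "leste"), ((-1, 0), "oeste"), ((0, 1), "sul"), ((0, -1), "norte")]

-- body of B's inner `for i in range(1, len(x))` loop for one direction (d, nome)
def pvStepBInner (x : List Int) (y : List Int) (d : Int × Int) (nome : String)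
    (h : PySem.Dict Int String) (i : Int) : PySem.Dict Int String :=
  if PySem.List.pyGetD x i 0 = PySem.List.pyGetD x (i - 1) 0 + d.1 ∧
     PySem.List.pyGetD y i 0 = PySem.List.pyGetD y (i - 1) 0 + d.2
  then h.insert i nome else h

-- `[hits[i] for i in sorted(hits)]`: every i iterated comes from hits, so Python's
-- hits[i] never raises; ported as getD with an unused default
def gera_direcoes_alt (x : List Int) (y : List Int) : List String :=
  let hits := pvDirsB.foldl
    (fun h p => (PySem.List.pyRange 1 (x.length : Int) 1).foldl (pvStepBInner x y p.1 p.2) h)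
    PySem.Dict.empty
  (PySem.List.sorted hits.keys (fun k => k) false).map (fun i => hits.getD i "")

-- ===== PRECONDITION & SPEC =====
-- A reads y[i] for every i < len(x), so it raises IndexError exactly when len(y) < len(x)
def Pre_gera_direcoes (x : List Int) (y : List Int) : Prop := x.length ≤ y.length
instance (x : List Int) (y : List Int) : Decidable (Pre_gera_direcoes x y) := by
  unfold Pre_gera_direcoes; infer_instance
def pvWitness_gera_direcoes : List Int × List Int := ([0, 1, 1, 0], [0, 1, 2, 2])

def Spec_gera_direcoes (x : List Int) (y : List Int) (out : List String) : Prop :=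
  out = gera_direcoes_alt x y
instance (x : List Int) (y : List Int) (out : List String) : Decidable (Spec_gera_direcoes x y out) := by
  unfold Spec_gera_direcoes; infer_instance

-- ===== CLAIM (what is proved, stated in full; the proofs are below) =====
def Claim_equal_gera_direcoes : Prop := ∀ (x : List Int) (y : List Int),
  Dom_gera_direcoes x y → Pre_gera_direcoes x y → Spec_gera_direcoes x y (gera_direcoes x y)
-- ===== LEMMAS AND PROOFS =====

-- proof-side canonical form: the (dx, dy) → name table as an assoc-list dict …
def pvTable : PySem.Dict (Int × Int) String := PySem.Dict.mk pvDirsB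

-- … and the per-index lookup both programs compute
def pvLook (x : List Int) (y : List Int) (i : Int) : Option String :=
  pvTable.get? (PySem.List.pyGetD x i 0 - PySem.List.pyGetD x (i - 1) 0,
                PySem.List.pyGetD y i 0 - PySem.List.pyGetD y (i - 1) 0)

-- canonical single-pass step (proof-side only)
def pvStepC (x : List Int) (y : List Int) (res : List String) (i : Int) : List String :=
  match pvLook x y i with
  | some nome => res ++ [nome]
  | none => res

-- pointwise: A's if/elif cascade on prev (a,b), cur (c,d) appends exactly what the table lookup at (c-a, d-b) yields
lemma pv_dirs_eq (a b c d : Int) (r : List String) :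
    (if a ≠ c ∧ b ≠ d then
        (((r ++ (if c = a + 1 ∧ d = b + 1 then [PySem.List.pyGetD pvDirecoes 6 ""] else []))
               ++ (if c = a + 1 ∧ d = b - 1 then [PySem.List.pyGetD pvDirecoes 4 ""] else []))
               ++ (if c = a - 1 ∧ d = b + 1 then [PySem.List.pyGetD pvDirecoes 7 ""] else []))
               ++ (if c = a - 1 ∧ d = b - 1 then [PySem.List.pyGetD pvDirecoes 5 ""] else [])
      else if a ≠ c ∧ b = d then
        (r ++ (if c = a + 1 then [PySem.List.pyGetD pvDirecoes 2 ""] else []))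
              ++ (if c = a - 1 then [PySem.List.pyGetD pvDirecoes 3 ""] else [])
      else if a = c ∧ b ≠ d then
        (r ++ (if d = b + 1 then [PySem.List.pyGetD pvDirecoes 1 ""] else []))
              ++ (if d = b - 1 then [PySem.List.pyGetD pvDirecoes 0 ""] else [])
      else r)
    = match pvTable.get? (c - a, d - b) with
      | some nome => r ++ [nome]
      | none => r := by
  simp only [pvDirecoes, pvTable, pvDirsB, PySem.Dict.get?_mk_cons, beq_iff_eq, Prod.ext_iff,
    PySem.List.pyGetD]
  by_cases h1 : c = a + 1 <;> by_cases h2 : c = a - 1 <;> by_cases h3 : c = a <;>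
    by_cases k1 : d = b + 1 <;> by_cases k2 : d = b - 1 <;> by_cases k3 : d = b <;>
    first
      | (exfalso; omega)
      | (repeat first | rw [if_pos (by omega)] | rw [if_neg (by omega)])
  all_goals first | rfl | simp [PySem.Dict.get?]

-- A's fold over range(0,n) carries coordenadas = the coordinate-pair list and
-- resultado = the canonical fold over range(1,n)
lemma pv_fold_eq (x y : List Int) (n : Nat) :
    (PySem.List.pyRange 0 (n : Int) 1).foldl (pvStepA x y) ([], []) =
      ((PySem.List.pyRange 0 (n : Int) 1).map
          (fun i => (PySem.List.pyGetD x i 0, PySem.List.pyGetD y i 0)),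
       (PySem.List.pyRange 1 (n : Int) 1).foldl (pvStepC x y) []) := by
  induction n with
  | zero => simp [PySem.List.pyRange_one_eq_nil]
  | succ m ih =>
    have hcast : ((m + 1 : Nat) : Int) = (m : Int) + 1 := by push_cast; ring
    rcases Nat.eq_zero_or_pos m with hm | hm
    · subst hm
      rw [show ((0 + 1 : Nat) : Int) = 1 by norm_num,
        show PySem.List.pyRange 0 1 1 = [0] from by decide,
        show PySem.List.pyRange 1 1 1 = [] from by decide]
      simp [pvStepA]
    · have h0 : (0 : Int) ≤ (m : Int) := by positivity
      have h1 : (1 : Int) ≤ (m : Int) := by exact_mod_cast hm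
      have hcoords : (PySem.List.pyRange 0 (m : Int) 1).map
            (fun i => (PySem.List.pyGetD x i 0, PySem.List.pyGetD y i 0)) ++
            [(PySem.List.pyGetD x (m : Int) 0, PySem.List.pyGetD y (m : Int) 0)] =
          (PySem.List.pyRange 0 ((m : Int) + 1) 1).map
            (fun i => (PySem.List.pyGetD x i 0, PySem.List.pyGetD y i 0)) := by
        rw [PySem.List.pyRange_one_succ_right h0, List.map_append]; rfl
      rw [hcast, PySem.List.pyRange_one_succ_right h0, PySem.List.pyRange_one_succ_right h1,
        List.foldl_append, List.foldl_append, List.map_append, ih]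
      simp only [List.foldl_cons, List.foldl_nil, List.map_cons, List.map_nil]
      simp only [pvStepA]
      rw [if_pos (show (m : Int) ≠ 0 by omega)]
      rw [hcoords,
        PySem.List.pyGetD_map_pyRange_of_nonneg
          (fun i => (PySem.List.pyGetD x i 0, PySem.List.pyGetD y i 0))
          ((m : Int) + 1) ((m : Int) - 1) (0, 0) (by omega) (by omega),
        PySem.List.pyGetD_map_pyRange_of_nonneg
          (fun i => (PySem.List.pyGetD x i 0, PySem.List.pyGetD y i 0))
          ((m : Int) + 1) (m : Int) (0, 0) (by omega) (by omega)]
      dsimp only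
      simp only [Prod.mk.injEq]
      refine ⟨trivial, ?_⟩
      simp only [pvStepC, pvLook]
      exact pv_dirs_eq _ _ _ _ _

-- canonical fold = filterMap of the per-index lookup
lemma pv_foldC_filterMap (x y : List Int) :
    ∀ (l : List Int) (acc : List String),
      l.foldl (pvStepC x y) acc = acc ++ l.filterMap (pvLook x y) := by
  intro l
  induction l with
  | nil => simp
  | cons a t ih =>
    intro acc
    simp only [List.foldl_cons, List.filterMap_cons, pvStepC]
    cases h : pvLook x y a <;> simp [ih]

-- so A is the filterMap over range(1, len x)
lemma pv_A_eq (x y : List Int) :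
    gera_direcoes x y =
      (PySem.List.pyRange 1 (x.length : Int) 1).filterMap (pvLook x y) := by
  unfold gera_direcoes
  rw [pv_fold_eq, pv_foldC_filterMap]
  simp

-- one direction pass: what the dict answers afterwards
lemma pv_inner_get? (x y : List Int) (d : Int × Int) (nome : String) :
    ∀ (l : List Int) (h : PySem.Dict Int String) (j : Int),
      ((l.foldl (pvStepBInner x y d nome) h).get? j) =
        if j ∈ l ∧ PySem.List.pyGetD x j 0 = PySem.List.pyGetD x (j - 1) 0 + d.1 ∧
                   PySem.List.pyGetD y j 0 = PySem.List.pyGetD y (j - 1) 0 + d.2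
        then some nome else h.get? j := by
  intro l
  induction l with
  | nil => simp
  | cons a t ih =>
    intro h j
    simp only [List.foldl_cons, ih, pvStepBInner]
    by_cases hj : j = a
    · subst hj
      by_cases hc : PySem.List.pyGetD x j 0 = PySem.List.pyGetD x (j - 1) 0 + d.1 ∧
                    PySem.List.pyGetD y j 0 = PySem.List.pyGetD y (j - 1) 0 + d.2
      · simp [hc, PySem.Dict.get?_insert_self]
      · simp [hc]
    · by_cases hc : PySem.List.pyGetD x a 0 = PySem.List.pyGetD x (a - 1) 0 + d.1 ∧
                    PySem.List.pyGetD y a 0 = PySem.List.pyGetD y (a - 1) 0 + d.2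
      · simp [hc, PySem.Dict.get?_insert_of_ne _ _ hj, List.mem_cons, hj]
      · simp [hc, List.mem_cons, hj]

-- one direction pass keeps the keys unique
lemma pv_inner_nodup (x y : List Int) (d : Int × Int) (nome : String) :
    ∀ (l : List Int) (h : PySem.Dict Int String), h.keys.Nodup →
      (l.foldl (pvStepBInner x y d nome) h).keys.Nodup := by
  intro l
  induction l with
  | nil => intro h hh; simp only [List.foldl_nil]; exact hh
  | cons a t ih =>
    intro h hh
    simp only [List.foldl_cons, pvStepBInner]
    split
    · exact ih _ (PySem.Dict.nodup_keys_insert _ _ _ hh)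
    · exact ih _ hh

-- the final dict answers exactly the canonical per-index lookup, inside the range
lemma pv_hits_get? (x y : List Int) (j : Int) :
    ((pvDirsB.foldl
        (fun h p => (PySem.List.pyRange 1 (x.length : Int) 1).foldl (pvStepBInner x y p.1 p.2) h)
        PySem.Dict.empty).get? j) =
      if j ∈ PySem.List.pyRange 1 (x.length : Int) 1 then pvLook x y j else none := by
  simp only [pvDirsB, List.foldl_cons, List.foldl_nil]
  simp only [pv_inner_get?, PySem.Dict.get?_empty]
  by_cases hj : j ∈ PySem.List.pyRange 1 (x.length : Int) 1
  · simp only [hj, true_and, if_true]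
    simp only [pvLook, pvTable, pvDirsB, PySem.Dict.get?_mk_cons, beq_iff_eq, Prod.ext_iff]
    set a := PySem.List.pyGetD x (j - 1) 0
    set b := PySem.List.pyGetD y (j - 1) 0
    set c := PySem.List.pyGetD x j 0
    set d := PySem.List.pyGetD y j 0
    by_cases h1 : c = a + 1 <;> by_cases h2 : c = a - 1 <;> by_cases h3 : c = a <;>
      by_cases k1 : d = b + 1 <;> by_cases k2 : d = b - 1 <;> by_cases k3 : d = b <;>
      first
        | (exfalso; omega)
        | (repeat first | rw [if_pos (by omega)] | rw [if_neg (by omega)])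
    all_goals rfl
  · simp [hj]

-- final dict keys are unique
lemma pv_hits_nodup (x y : List Int) :
    (pvDirsB.foldl
        (fun h p => (PySem.List.pyRange 1 (x.length : Int) 1).foldl (pvStepBInner x y p.1 p.2) h)
        PySem.Dict.empty).keys.Nodup := by
  simp only [pvDirsB, List.foldl_cons, List.foldl_nil]
  repeat apply pv_inner_nodup
  exact PySem.Dict.nodup_keys_empty

-- filter-of-isSome then map-getD is filterMap
lemma pv_filter_map_getD (f : Int → Option String) :
    ∀ (l : List Int),
      (l.filter (fun i => (f i).isSome)).map (fun i => (f i).getD "") = l.filterMap f := by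
  intro l
  induction l with
  | nil => rfl
  | cons a t ih =>
    simp only [List.filter_cons, List.filterMap_cons]
    cases h : f a <;> simp [h, ih]

-- B equals the same filterMap
lemma pv_B_eq (x y : List Int) :
    gera_direcoes_alt x y =
      (PySem.List.pyRange 1 (x.length : Int) 1).filterMap (pvLook x y) := by
  unfold gera_direcoes_alt
  set rng := PySem.List.pyRange 1 (x.length : Int) 1 with hrng
  set hits := pvDirsB.foldl
    (fun h p => rng.foldl (pvStepBInner x y p.1 p.2) h) PySem.Dict.empty with hhits
  have hget : ∀ j, hits.get? j = if j ∈ rng then pvLook x y j else none := by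
    intro j; rw [hhits, hrng]; exact pv_hits_get? x y j
  have hnd : hits.keys.Nodup := by rw [hhits, hrng]; exact pv_hits_nodup x y
  have hK : (rng.filter (fun i => (pvLook x y i).isSome)).Pairwise (· < ·) :=
    (PySem.List.pairwise_lt_pyRange_one 1 (x.length : Int)).filter _
  have hKnd : (rng.filter (fun i => (pvLook x y i).isSome)).Nodup :=
    hK.imp (fun h => ne_of_lt h)
  have hmem : ∀ j, j ∈ rng.filter (fun i => (pvLook x y i).isSome) ↔ j ∈ hits.keys := by
    intro j
    rw [List.mem_filter]
    rw [← not_iff_not, ← PySem.Dict.get?_eq_none_iff_not_mem_keys, hget]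
    by_cases hj : j ∈ rng
    · simp [hj, Option.isSome_iff_ne_none]
    · simp [hj]
  have hperm : (rng.filter (fun i => (pvLook x y i).isSome)).Perm hits.keys :=
    (List.perm_ext_iff_of_nodup hKnd hnd).mpr hmem
  have hsorted : PySem.List.sorted hits.keys (fun k => k) false =
      rng.filter (fun i => (pvLook x y i).isSome) :=
    PySem.List.sorted_eq_of_perm_of_pairwise_lt _ _ _ hperm hK
  show (PySem.List.sorted hits.keys (fun k => k) false).map (fun i => hits.getD i "") =
    rng.filterMap (pvLook x y)
  rw [hsorted]
  rw [List.map_congr_left (fun i hi => by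
    rw [PySem.Dict.getD_eq_get?_getD, hget i, if_pos (List.mem_filter.mp hi).1])]
  exact pv_filter_map_getD (pvLook x y) rng

-- ===== VERDICT (by name: the statement is the Claim_ definition above) =====
theorem gera_direcoes_spec : Claim_equal_gera_direcoes := by
  intro x y _ _
  unfold Spec_gera_direcoes
  rw [pv_A_eq, pv_B_eq]
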